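-- pv_equiv track=rewrite | github.com/fahuddin/image-processing-module- | image-module.py | fold_diag
-- ===== SOURCE A (Python) =====
-- def create_uniform_image(height, width, pixel):
--     """ creates and returns a 2-D list of pixels with height rows and
--         width columns in which all of the pixels have the RGB values
--         given by pixel
--         inputs: height and width are non-negative integers
--                 pixel is a 1-D list of RBG values of the form [R,G,B],
--                      where each element is an integer between 0 and 255.
--     """
--     pixels = []
--
--     for r in range(height):
--         row = [pixel] * width
--         pixels += [row]
--
--     return pixels
--
-- def blank_image(height, width):
--     """ creates and returns a 2-D list of pixels with height rows and
--         width columns in which all of the pixels are green.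
--         inputs: height and width are non-negative integers
--     """
--     all_green = create_uniform_image(height, width, [0, 255, 0])
--     return all_green
--
-- def fold_diag(pixels):
--     """ takes the 2-D list pixels containing pixels for an image, and that creates and returns a new 2-D list"""
--     x = blank_image(len(pixels), len(pixels[0]))
--     for r in range(len(pixels)):
--         for c in range(len(pixels[0])):
--                 if r > c:
--                     x[r][c] = [255, 255, 255]
--                 else:
--                     x[r][c] = pixels[r][c]
--     return x
-- ===== SOURCE B (Python) =====
-- def fold_diag(pixels):
--     width = len(pixels[0])
--     result = []
--     for r, row in enumerate(pixels):
--         w = min(r, width)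
--         result.append([[255, 255, 255]] * w + row[w:width])
--     return result
-- ===== Notes on version B (the rewrite author's own statement) =====
-- stated objective: alternative
-- what changed: Instead of allocating a green blank grid and overwriting every cell with a per-cell r>c test, B builds each row directly in one pass as a replicated white prefix of length min(r, width) plus the tail slice row[w:width], exploiting that below-diagonal cells form a contiguous row prefix.
import Mathlib
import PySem

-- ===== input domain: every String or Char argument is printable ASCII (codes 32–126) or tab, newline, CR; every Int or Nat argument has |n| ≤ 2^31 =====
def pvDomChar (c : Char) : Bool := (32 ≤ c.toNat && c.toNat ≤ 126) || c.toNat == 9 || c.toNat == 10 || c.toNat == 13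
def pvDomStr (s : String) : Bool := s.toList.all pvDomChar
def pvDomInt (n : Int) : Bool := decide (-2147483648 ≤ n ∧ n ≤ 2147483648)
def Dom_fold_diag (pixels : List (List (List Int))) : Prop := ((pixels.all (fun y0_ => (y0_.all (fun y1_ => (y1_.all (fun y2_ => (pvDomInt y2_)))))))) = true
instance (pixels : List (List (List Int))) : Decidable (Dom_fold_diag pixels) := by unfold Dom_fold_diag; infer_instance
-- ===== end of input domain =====

-- B replaces A's blank-grid-then-overwrite-every-cell pass by building each row directly
-- as a white prefix of length min(r, width) plus the tail slice of the input row
-- (same asymptotic cost; equivalence of return values proved on Pre_ below).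

-- ===== PORT A =====
def create_uniform_image (height width : Int) (pixel : List Int) : List (List (List Int)) :=
  (PySem.List.pyRange 0 height 1).foldl
    (fun pixels _ => pixels ++ [PySem.List.pyRepeat [pixel] width]) []

def blank_image (height width : Int) : List (List (List Int)) :=
  create_uniform_image height width [0, 255, 0]

def fold_diag (pixels : List (List (List Int))) : List (List (List Int)) :=
  let x := blank_image (PySem.List.len pixels) (PySem.List.len (PySem.List.pyGetD pixels 0 []))
  (PySem.List.pyRange 0 (PySem.List.len pixels) 1).foldl (fun x r =>
    (PySem.List.pyRange 0 (PySem.List.len (PySem.List.pyGetD pixels 0 [])) 1).foldl (fun x c =>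
      PySem.List.pySetD x r
        (PySem.List.pySetD (PySem.List.pyGetD x r []) c
          (if r > c then ([255, 255, 255] : List Int)
           else PySem.List.pyGetD (PySem.List.pyGetD pixels r []) c []))) x) x

-- ===== PORT B =====
def fold_diag_alt (pixels : List (List (List Int))) : List (List (List Int)) :=
  let width : Int := PySem.List.len (PySem.List.pyGetD pixels 0 [])
  (PySem.List.enumerate pixels).foldl
    (fun result p =>
      let w : Int := min p.1 width
      result ++ [PySem.List.pyRepeat [([255, 255, 255] : List Int)] w
                  ++ PySem.List.slice p.2 (some w) (some width)]) []

-- ===== PRECONDITION & SPEC =====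
-- Pre_ excludes exactly the inputs where the Python A raises IndexError: the empty list
-- (len(pixels[0]) fails) and ragged inputs where some row r < width is shorter than width
-- (the read pixels[r][c] fails for some c in [r, width)).
def Pre_fold_diag (pixels : List (List (List Int))) : Prop :=
  pixels ≠ [] ∧ ∀ i < pixels.length, i < (pixels.headD []).length →
    (pixels.headD []).length ≤ (pixels.getD i []).length
instance (pixels : List (List (List Int))) : Decidable (Pre_fold_diag pixels) := by
  unfold Pre_fold_diag; infer_instance

def pvWitness_fold_diag : List (List (List Int)) := [[[0, 0, 0], [1, 2, 3]], [[4, 5, 6], [7, 8, 9]]]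

def Spec_fold_diag (pixels : List (List (List Int))) (out : List (List (List Int))) : Prop := out = fold_diag_alt pixels
instance (pixels : List (List (List Int))) (out : List (List (List Int))) : Decidable (Spec_fold_diag pixels out) := by unfold Spec_fold_diag; infer_instance

-- ===== CLAIM (what is proved, stated in full; the proofs are below) =====
def Claim_equal_fold_diag : Prop := ∀ (pixels : List (List (List Int))), Dom_fold_diag pixels → Pre_fold_diag pixels → Spec_fold_diag pixels (fold_diag pixels)

-- ===== LEMMAS AND PROOFS =====

-- the value A writes at cell (r, c): white below the diagonal, else the input pixel
def pvVal (pixels : List (List (List Int))) (r c : Nat) : List Int :=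
  if c < r then [255, 255, 255] else ((pixels.getD r []).getD c [])

-- the row both programs produce at index r (width W)
def pvRow (pixels : List (List (List Int))) (W r : Nat) : List (List Int) :=
  (List.range W).map (pvVal pixels r)

lemma pv_create_uniform (n W : Nat) (p : List Int) :
    create_uniform_image (n : Int) (W : Int) p = List.replicate n (List.replicate W p) := by
  unfold create_uniform_image
  rw [PySem.List.pyRange_zero_natCast, List.foldl_map,
      PySem.List.foldl_append_singleton_eq_map]
  simp [PySem.List.pyRepeat_singleton, List.map_const']

-- filling every position 0..W-1 of a length-W row yields the map
lemma pv_fill_row {α : Type} (f : Nat → α) :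
    ∀ (b a : Nat) (l : List α), a + b = l.length →
    (List.range' a b).foldl (fun l c => l.set c (f c)) l
      = l.take a ++ (List.range' a b).map f := by
  intro b
  induction b with
  | zero => intro a l h; simp; omega
  | succ b ih =>
    intro a l h
    rw [List.range'_succ, List.foldl_cons, ih (a + 1) _ (by simp; omega)]
    rw [List.set_eq_take_cons_drop (f a) (by omega)]
    rw [List.take_append]
    simp [List.length_take, Nat.min_eq_left (by omega : a ≤ l.length)]

-- folding "x[r] = g(x[r])"-style updates at a fixed r commutes out of the loop
lemma pv_fold_at_row {α : Type} [Inhabited α] (r : Nat) (f : Nat → α) :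
    ∀ (cs : List Nat) (x : List (List α)), r < x.length →
    cs.foldl (fun x c => x.set r ((x.getD r []).set c (f c))) x
      = x.set r (cs.foldl (fun row c => row.set c (f c)) (x.getD r [])) := by
  intro cs
  induction cs with
  | nil =>
    intro x h
    simp only [List.foldl_nil]
    rw [List.getD_eq_getElem _ _ h, List.set_getElem_self h]
  | cons c cs ih =>
    intro x h
    rw [List.foldl_cons, ih _ (by simpa using h), List.foldl_cons]
    have h' : r < (x.set r ((x.getD r []).set c (f c))).length := by simpa using h
    rw [List.getD_eq_getElem _ _ h',
        List.getElem_set_self (by simpa using h), List.set_set]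

-- reading a contiguous index range is the drop/take slice
lemma pv_map_getD_range' {α : Type} (l : List α) (d : α) :
    ∀ (b a : Nat), a + b ≤ l.length →
    (List.range' a b).map (fun c => l.getD c d) = (l.drop a).take b := by
  intro b
  induction b with
  | zero => simp
  | succ b ih =>
    intro a h
    rw [List.range'_succ, List.map_cons, ih (a + 1) (by omega),
        List.getD_eq_getElem _ _ (show a < l.length by omega),
        List.drop_eq_getElem_cons (show a < l.length by omega), List.take_succ_cons]

-- the outer loop of A: rows 0..n-1 are replaced one by one
lemma pv_outer (pixels : List (List (List Int))) (W : Nat) :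
    ∀ (b a : Nat) (x : List (List (List Int))), a + b = x.length →
    (∀ j (h : j < x.length), x[j].length = W) →
    (List.range' a b).foldl
      (fun x r => x.set r ((List.range W).foldl
        (fun row c => row.set c (pvVal pixels r c)) (x.getD r []))) x
      = x.take a ++ (List.range' a b).map (pvRow pixels W) := by
  intro b
  induction b with
  | zero => intro a x h _; simp; omega
  | succ b ih =>
    intro a x h hw
    have ha : a < x.length := by omega
    have hrow : (x.getD a []).length = W := by
      rw [List.getD_eq_getElem _ _ ha]; exact hw a ha
    have hfill : (List.range W).foldl
        (fun row c => row.set c (pvVal pixels a c)) (x.getD a []) = pvRow pixels W a := by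
      rw [List.range_eq_range', pv_fill_row _ W 0 _ (by omega)]
      simp [pvRow, List.range_eq_range']
    rw [List.range'_succ, List.foldl_cons, hfill,
        ih (a + 1) _ (by simp; omega)
          (by intro j hj
              rw [List.getElem_set]
              split
              · simp [pvRow]
              · exact hw j (by simpa using hj))]
    rw [List.set_eq_take_cons_drop _ ha]
    rw [List.take_append]
    simp [List.length_take, Nat.min_eq_left (by omega : a ≤ x.length)]

-- the row B builds equals the row A leaves, given the row is long enough
lemma pv_row_alt (pixels : List (List (List Int))) (W r : Nat)
    (hlen : r < W → W ≤ (pixels.getD r []).length) :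
    PySem.List.pyRepeat [([255, 255, 255] : List Int)] (min (r : Int) (W : Int))
      ++ PySem.List.slice (pixels.getD r []) (some (min (r : Int) (W : Int))) (some (W : Int))
      = pvRow pixels W r := by
  have hmin : min (r : Int) (W : Int) = ((min r W : Nat) : Int) := by
    simp [Nat.cast_min]
  rw [hmin, PySem.List.pyRepeat_singleton, PySem.List.slice_natCast]
  simp only [Int.toNat_natCast]
  by_cases hr : r < W
  · have hm : min r W = r := by omega
    rw [hm]
    unfold pvRow
    have hsplit : List.range W = List.range' 0 r ++ List.range' r (W - r) := by
      rw [List.range_eq_range', show W = r + (W - r) by omega, ← List.range'_append]; simp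
    rw [hsplit, List.map_append]
    congr 1
    · have : ∀ c ∈ List.range' 0 r, pvVal pixels r c = [255, 255, 255] := by
        intro c hc; simp [List.mem_range'] at hc; simp [pvVal]; omega
      rw [List.map_congr_left this]
      simp [List.map_const']
    · have : ∀ c ∈ List.range' r (W - r), pvVal pixels r c
          = (pixels.getD r []).getD c [] := by
        intro c hc; simp [List.mem_range'] at hc; simp [pvVal]; omega
      rw [List.map_congr_left this, pv_map_getD_range' _ _ (W - r) r (by omega)]
  · have hm : min r W = W := by omega
    rw [hm]
    simp
    unfold pvRow
    have : ∀ c ∈ List.range W, pvVal pixels r c = [255, 255, 255] := by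
      intro c hc; simp [List.mem_range] at hc; simp [pvVal]; omega
    rw [List.map_congr_left this]
    simp [List.map_const']

-- A computes the mapped rows
lemma pv_fold_diag_eq (pixels : List (List (List Int))) :
    fold_diag pixels
      = (List.range pixels.length).map (pvRow pixels (pixels.headD []).length) := by
  have hh : pixels.getD 0 [] = pixels.headD [] := by cases pixels <;> rfl
  unfold fold_diag blank_image
  simp only [PySem.List.len_eq, PySem.List.pyGetD_zero, hh]
  rw [pv_create_uniform, PySem.List.pyRange_zero_natCast pixels.length, List.foldl_map]
  have hinner : ∀ (x : List (List (List Int))) (r : Nat),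
      (PySem.List.pyRange 0 ((pixels.headD []).length : Int) 1).foldl
        (fun x c => PySem.List.pySetD x (r : Int)
          (PySem.List.pySetD (PySem.List.pyGetD x (r : Int) []) c
            (if (r : Int) > c then ([255, 255, 255] : List Int)
             else PySem.List.pyGetD (PySem.List.pyGetD pixels (r : Int) []) c []))) x
      = (List.range (pixels.headD []).length).foldl
          (fun x c => x.set r ((x.getD r []).set c (pvVal pixels r c))) x := by
    intro x r
    rw [PySem.List.pyRange_zero_natCast, List.foldl_map]
    apply PySem.List.foldl_congr_mem
    intro acc c _
    simp [pvVal, PySem.List.pyGetD_natCast]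
  simp only [hinner]
  have hcomm : ∀ (x : List (List (List Int))) (r : Nat), r < x.length →
      (List.range (pixels.headD []).length).foldl
        (fun x c => x.set r ((x.getD r []).set c (pvVal pixels r c))) x
      = x.set r ((List.range (pixels.headD []).length).foldl
          (fun row c => row.set c (pvVal pixels r c)) (x.getD r [])) :=
    fun x r h => pv_fold_at_row r _ _ x h
  -- rewrite each outer step into the set form, then apply pv_outer
  set W := (pixels.headD []).length with hW
  set n := pixels.length with hn
  have hstart : (List.range n).foldl
      (fun x r => (List.range W).foldl
        (fun x c => x.set r ((x.getD r []).set c (pvVal pixels r c))) x)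
      (List.replicate n (List.replicate W [0, 255, 0]))
      = (List.range n).foldl
        (fun x r => x.set r ((List.range W).foldl
          (fun row c => row.set c (pvVal pixels r c)) (x.getD r [])))
        (List.replicate n (List.replicate W [0, 255, 0])) := by
    -- both folds preserve length; prove by a generalized induction over range'
    have : ∀ (b a : Nat) (x : List (List (List Int))), a + b = x.length →
        (List.range' a b).foldl
          (fun x r => (List.range W).foldl
            (fun x c => x.set r ((x.getD r []).set c (pvVal pixels r c))) x) x
        = (List.range' a b).foldl
          (fun x r => x.set r ((List.range W).foldl
            (fun row c => row.set c (pvVal pixels r c)) (x.getD r []))) x := by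
      intro b
      induction b with
      | zero => intro a x _; rfl
      | succ b ih =>
        intro a x h
        rw [List.range'_succ, List.foldl_cons, List.foldl_cons,
            hcomm x a (by omega), ih (a + 1) _ (by simp; omega)]
    rw [show List.range n = List.range' 0 n from List.range_eq_range', this n 0 _ (by simp)]
  rw [hstart, show List.range n = List.range' 0 n from List.range_eq_range',
      pv_outer pixels W n 0 _ (by simp) (by intro j hj; simp)]
  simp [← List.range_eq_range']

-- B computes the same mapped rows on Pre_
lemma pv_fold_diag_alt_eq (pixels : List (List (List Int))) (hpre : Pre_fold_diag pixels) :
    fold_diag_alt pixels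
      = (List.range pixels.length).map (pvRow pixels (pixels.headD []).length) := by
  have hh : pixels.getD 0 [] = pixels.headD [] := by cases pixels <;> rfl
  unfold fold_diag_alt
  simp only [PySem.List.len_eq, PySem.List.pyGetD_zero, hh]
  rw [PySem.List.enumerate_eq_map_pyRange (d := ([] : List (List Int))), List.foldl_map]
  simp only [PySem.List.len_eq]
  rw [PySem.List.pyRange_zero_natCast, List.foldl_map,
      PySem.List.foldl_append_singleton_eq_map, List.nil_append]
  apply List.map_congr_left
  intro r hr
  simp only [List.mem_range] at hr
  simp only [PySem.List.pyGetD_natCast]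
  exact pv_row_alt pixels (pixels.headD []).length r
    (fun h => hpre.2 r hr (by simpa using h))

-- ===== VERDICT (by name: the statement is the Claim_ definition above) =====
theorem fold_diag_spec : Claim_equal_fold_diag := by
  intro pixels _ hpre
  unfold Spec_fold_diag
  rw [pv_fold_diag_eq, pv_fold_diag_alt_eq pixels hpre]
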